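-- pv_equiv track=rewrite | github.com/snoobysnoofy/python-assignments-solutions | week06/PPA10.py | group_by_city
-- ===== SOURCE A (Python) =====
-- def group_by_city(scores_dataset):
--     cities = {}
--     for entries in scores_dataset:
--         city = entries["City"]
--         name = entries["Name"]
--         if city not in cities:
--             cities[city] = []
--
--         cities[city].append(name)
--
--     return cities
-- ===== SOURCE B (Python) =====
-- def group_by_city(scores_dataset):
--     pairs = [(e["City"], e["Name"]) for e in scores_dataset]
--     return {c: [n for c2, n in pairs if c2 == c]
--             for c in dict.fromkeys(c for c, _ in pairs)}
-- ===== Notes on version B (the rewrite author's own statement) =====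
-- stated objective: alternative
-- what changed: Instead of one scatter pass mutating a dict in place, B extracts (city, name) pairs, dedups the cities in first-occurrence order, and builds the result with a dict comprehension that filters the pairs once per distinct city.
import Mathlib
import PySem

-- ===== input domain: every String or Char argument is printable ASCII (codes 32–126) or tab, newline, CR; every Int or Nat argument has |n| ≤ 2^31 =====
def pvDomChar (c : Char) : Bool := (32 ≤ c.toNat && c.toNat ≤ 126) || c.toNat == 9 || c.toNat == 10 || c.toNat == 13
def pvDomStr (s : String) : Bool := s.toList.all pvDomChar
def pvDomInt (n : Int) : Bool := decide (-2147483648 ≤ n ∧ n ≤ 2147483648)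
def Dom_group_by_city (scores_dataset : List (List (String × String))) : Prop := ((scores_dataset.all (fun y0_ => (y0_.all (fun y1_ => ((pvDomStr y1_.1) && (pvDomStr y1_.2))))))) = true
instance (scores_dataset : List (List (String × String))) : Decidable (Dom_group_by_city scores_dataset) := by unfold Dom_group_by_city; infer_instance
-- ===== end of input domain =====

-- B replaces A's single scatter pass (mutating a dict) by: extract (city,name) pairs,
-- dedup the cities in first-occurrence order, then one filtering pass per distinct city.


-- ===== PORT A =====
-- the loop body of A; entries["City"] / entries["Name"] would be a KeyError when the
-- key is absent — those inputs are excluded by Pre_ (the getD default is never reached there)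
def pvStepA (cities : PySem.Dict String (List String)) (entries : List (String × String)) :
    PySem.Dict String (List String) :=
  let e := PySem.Dict.ofList entries
  let city := e.getD "City" ""
  let name := e.getD "Name" ""
  let cities := if cities.contains city then cities else cities.insert city []
  cities.modify city [] (fun l => l ++ [name])

def group_by_city (scores_dataset : List (List (String × String))) : List (String × List String) :=
  (scores_dataset.foldl pvStepA PySem.Dict.empty).items

-- ===== PORT B =====
def group_by_city_alt (scores_dataset : List (List (String × String))) : List (String × List String) :=
  let pairs := scores_dataset.map (fun e =>
    ((PySem.Dict.ofList e).getD "City" "", (PySem.Dict.ofList e).getD "Name" ""))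
  (PySem.List.dedup (pairs.map Prod.fst)).map
    (fun c => (c, (pairs.filter (fun p => p.1 == c)).map Prod.snd))

-- ===== PRECONDITION & SPEC =====
-- Pre_ excludes exactly the entries missing a "City" or "Name" key, on which A raises KeyError.
def Pre_group_by_city (scores_dataset : List (List (String × String))) : Prop :=
  ∀ e ∈ scores_dataset, "City" ∈ e.map Prod.fst ∧ "Name" ∈ e.map Prod.fst
instance (scores_dataset : List (List (String × String))) : Decidable (Pre_group_by_city scores_dataset) := by unfold Pre_group_by_city; infer_instance

def pvWitness_group_by_city : (List (List (String × String))) :=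
  [[("City", "Pune"), ("Name", "Ana")],
   [("City", "Pune"), ("Name", "Bob")],
   [("City", "Delhi"), ("Name", "Cy")]]

def Spec_group_by_city (scores_dataset : List (List (String × String))) (out : List (String × List String)) : Prop := out = group_by_city_alt scores_dataset
instance (scores_dataset : List (List (String × String))) (out : List (String × List String)) : Decidable (Spec_group_by_city scores_dataset out) := by unfold Spec_group_by_city; infer_instance

-- ===== CLAIM (what is proved, stated in full; the proofs are below) =====
def Claim_equal_group_by_city : Prop := ∀ (scores_dataset : List (List (String × String))), Dom_group_by_city scores_dataset → Pre_group_by_city scores_dataset → Spec_group_by_city scores_dataset (group_by_city scores_dataset)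

-- ===== LEMMAS AND PROOFS =====

-- A's per-entry step is exactly "append name to the city's bucket"
theorem pvStepA_eq_modify (d : PySem.Dict String (List String)) (c n : String) :
    (if d.contains c then d else d.insert c []).modify c [] (· ++ [n]) = d.modify c [] (· ++ [n]) := by
  by_cases h : d.contains c = true
  · simp [h]
  · have hfalse : d.contains c = false := by simpa using h
    rw [if_neg h]
    apply PySem.Dict.ext
    simp [PySem.Dict.modify, PySem.Dict.insert_insert_self,
      PySem.Dict.items_insert_of_not_contains (h := hfalse),
      PySem.Dict.getD_insert_self, PySem.Dict.getD_of_not_contains (h := hfalse)]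

-- A's fold over the dataset is the plain modify-fold over the extracted (city, name) pairs
theorem foldA_eq (ds : List (List (String × String))) (d : PySem.Dict String (List String)) :
    ds.foldl pvStepA d =
      (ds.map (fun e => ((PySem.Dict.ofList e).getD "City" "", (PySem.Dict.ofList e).getD "Name" ""))).foldl
        (fun d p => d.modify p.1 [] (· ++ [p.2])) d := by
  induction ds generalizing d with
  | nil => rfl
  | cons e t ih =>
    simp only [List.foldl_cons, List.map_cons]
    rw [show pvStepA d e = d.modify ((PySem.Dict.ofList e).getD "City" "") []
          (· ++ [(PySem.Dict.ofList e).getD "Name" ""]) from pvStepA_eq_modify ..]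
    exact ih _

-- ===== VERDICT (by name: the statement is the Claim_ definition above) =====
theorem group_by_city_spec : Claim_equal_group_by_city := by
  intro ds _ _
  show group_by_city ds = group_by_city_alt ds
  unfold group_by_city group_by_city_alt
  rw [foldA_eq]
  set pairs := ds.map (fun e =>
    ((PySem.Dict.ofList e).getD "City" "", (PySem.Dict.ofList e).getD "Name" "")) with hp
  set D := pairs.foldl (fun d p => d.modify p.1 [] (· ++ [p.2])) PySem.Dict.empty with hD
  have hnodup : D.keys.Nodup := by
    rw [hD]
    exact PySem.Dict.nodup_keys_foldl_modify_key pairs Prod.fst [] (fun _ p l => l ++ [p.2])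
      PySem.Dict.empty (by simp [PySem.Dict.keys_empty])
  have hkeys : D.keys = PySem.List.dedup (pairs.map Prod.fst) := by
    rw [hD, PySem.Dict.keys_foldl_modify_key, PySem.List.dedup_eq_ofList]
    simp [PySem.Dict.keys_empty, PySem.Set.update, PySem.Set.ofList]
  rw [PySem.Dict.items_eq_map_keys D hnodup [], hkeys]
  refine List.map_congr_left fun c _ => ?_
  rw [hD, PySem.Dict.getD_foldl_modify_append]
  simp [PySem.Dict.getD_empty]
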